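-- pv_equiv track=rewrite | github.com/python-unsam/Programacion_en_Python_UNSAM | Ejercicios/Clase02/diccionario_geringoso.py | diccionario_geringoso
-- ===== SOURCE A (Python) =====
-- def diccionario_geringoso(palabras:list)->dict:
-- 	diccionario = dict()
-- 	for palabra in palabras:
-- 		palabra_en_geringoso = ''
-- 		for letra in palabra:
-- 		    if letra in ['a','e','i','o','u']:
-- 		        palabra_en_geringoso += letra + 'p' + letra
-- 		    else:
-- 		        palabra_en_geringoso += letra
-- 		diccionario[palabra] = palabra_en_geringoso
-- 	return diccionario
-- ===== SOURCE B (Python) =====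
-- def diccionario_geringoso(palabras: list) -> dict:
--     diccionario = dict()
--     for palabra in palabras:
--         g = palabra
--         for v in 'aeiou':
--             g = g.replace(v, v + 'p' + v)
--         diccionario[palabra] = g
--     return diccionario
-- ===== Notes on version B (the rewrite author's own statement) =====
-- stated objective: alternative
-- what changed: Replaces A's single per-character accumulation with a vowel/else branch by five staged whole-string replace passes (one str.replace per vowel), correct because each pass only inserts 'p' and copies of its own already-processed vowel, which no later pass touches.
import Mathlib
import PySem

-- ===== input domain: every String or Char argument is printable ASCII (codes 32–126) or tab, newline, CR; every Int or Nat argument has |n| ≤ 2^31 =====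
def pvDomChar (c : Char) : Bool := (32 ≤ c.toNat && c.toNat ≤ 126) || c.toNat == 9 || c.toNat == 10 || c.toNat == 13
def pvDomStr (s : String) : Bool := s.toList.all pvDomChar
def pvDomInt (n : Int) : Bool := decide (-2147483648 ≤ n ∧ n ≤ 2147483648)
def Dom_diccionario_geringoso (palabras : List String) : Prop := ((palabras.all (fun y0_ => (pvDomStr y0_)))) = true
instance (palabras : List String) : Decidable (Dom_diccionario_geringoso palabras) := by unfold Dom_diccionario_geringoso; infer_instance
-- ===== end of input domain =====

-- B builds each geringoso word by five staged whole-string replace passes (one per vowel)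
-- instead of A's single per-character accumulation with a vowel/else branch.
-- ===== PORT A =====
def gerWordA (palabra : String) : String :=
  palabra.toList.foldl
    (fun acc letra =>
      if letra ∈ ['a','e','i','o','u'] then acc ++ String.ofList [letra, 'p', letra]
      else acc ++ String.ofList [letra]) ""

def diccionario_geringoso (palabras : List String) : List (String × String) :=
  (palabras.foldl (fun d palabra => d.insert palabra (gerWordA palabra))
    (PySem.Dict.empty : PySem.Dict String String)).items

-- ===== PORT B =====
-- g = palabra; for v in 'aeiou': g = g.replace(v, v + 'p' + v)
def gerWordB (palabra : String) : String :=
  "aeiou".toList.foldl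
    (fun g v => PySem.Str.replace g (String.ofList [v]) (String.ofList [v, 'p', v])) palabra

def diccionario_geringoso_alt (palabras : List String) : List (String × String) :=
  (palabras.foldl (fun d palabra => d.insert palabra (gerWordB palabra))
    (PySem.Dict.empty : PySem.Dict String String)).items

-- ===== PRECONDITION & SPEC =====
def Spec_diccionario_geringoso (palabras : List String) (out : List (String × String)) : Prop := out = diccionario_geringoso_alt palabras
instance (palabras : List String) (out : List (String × String)) : Decidable (Spec_diccionario_geringoso palabras out) := by unfold Spec_diccionario_geringoso; infer_instance

-- ===== CLAIM (what is proved, stated in full; the proofs are below) =====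
def Claim_equal_diccionario_geringoso : Prop := ∀ (palabras : List String), Dom_diccionario_geringoso palabras → Spec_diccionario_geringoso palabras (diccionario_geringoso palabras)

-- ===== LEMMAS AND PROOFS =====

-- replace with a single-character pattern is a flatMap over the characters
lemma go_single (v : Char) (new : List Char) :
    ∀ (fuel : Nat) (l acc : List Char), l.length ≤ fuel →
      PySem.Chars.replace.go [v] new fuel l acc
        = acc.reverse ++ l.flatMap (fun c => if c = v then new else [c]) := by
  intro fuel
  induction fuel with
  | zero =>
    intro l acc h
    have : l = [] := List.eq_nil_of_length_eq_zero (Nat.le_zero.mp h)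
    subst this
    simp [PySem.Chars.replace.go]
  | succ n ih =>
    intro l acc h
    cases l with
    | nil => simp [PySem.Chars.replace.go]
    | cons c t =>
      rw [PySem.Chars.replace.go]
      by_cases hc : c = v
      · subst hc
        simp only [List.isPrefixOf, BEq.rfl, Bool.true_and, if_true,
          List.length_singleton, List.drop_one, List.tail_cons]
        rw [ih t (new.reverse ++ acc) (by simpa using Nat.le_of_succ_le_succ h)]
        simp
      · have hp : ([v].isPrefixOf (c :: t)) = false := by
          simp [List.isPrefixOf]; exact fun h' => (hc h'.symm).elim
        rw [if_neg (by simp [hp])]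
        rw [ih t (c :: acc) (by simpa using Nat.le_of_succ_le_succ h)]
        simp [hc]

lemma replace_single (v : Char) (new s : List Char) :
    PySem.Chars.replace s [v] new = s.flatMap (fun c => if c = v then new else [c]) := by
  rw [PySem.Chars.replace]
  simp [go_single v new s.length s [] (le_refl _)]

-- composing the five per-vowel substitutions gives exactly A's per-character transformation
lemma comp_tbl (c : Char) :
    List.flatMap
      (fun x3 => List.flatMap
        (fun x2 => List.flatMap
          (fun x1 => List.flatMap (fun x0 => if x0 = 'u' then ['u','p','u'] else [x0])
            (if x1 = 'o' then ['o','p','o'] else [x1]))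
          (if x2 = 'i' then ['i','p','i'] else [x2]))
        (if x3 = 'e' then ['e','p','e'] else [x3]))
      (if c = 'a' then ['a','p','a'] else [c])
      = if c ∈ ['a','e','i','o','u'] then [c, 'p', c] else [c] := by
  by_cases ha : c = 'a'
  · subst ha; decide
  by_cases he : c = 'e'
  · subst he; decide
  by_cases hi : c = 'i'
  · subst hi; decide
  by_cases ho : c = 'o'
  · subst ho; decide
  by_cases hu : c = 'u'
  · subst hu; decide
  simp [ha, he, hi, ho, hu]

lemma gerWordB_chars (p : String) :
    (gerWordB p).toList
      = p.toList.flatMap (fun c => if c ∈ ['a','e','i','o','u'] then [c, 'p', c] else [c]) := by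
  unfold gerWordB
  simp only [List.foldl_cons, List.foldl_nil, PySem.Str.toList_replace, String.toList_ofList,
    show "aeiou".toList = ['a','e','i','o','u'] from rfl]
  rw [replace_single, replace_single, replace_single, replace_single, replace_single]
  simp only [List.flatMap_assoc]
  exact List.flatMap_congr (fun c _ => comp_tbl c)

lemma gerWordA_aux (cs : List Char) (acc : String) :
    cs.foldl
      (fun acc letra =>
        if letra ∈ ['a','e','i','o','u'] then acc ++ String.ofList [letra, 'p', letra]
        else acc ++ String.ofList [letra]) acc
      = acc ++ String.ofList (cs.flatMap
          (fun c => if c ∈ ['a','e','i','o','u'] then [c, 'p', c] else [c])) := by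
  induction cs generalizing acc with
  | nil => simp
  | cons c t ih =>
    simp only [List.foldl_cons, List.flatMap_cons, ih]
    split_ifs <;> simp [String.append_assoc, ← String.ofList_append]

lemma gerWord_eq (p : String) : gerWordA p = gerWordB p := by
  have hb := gerWordB_chars p
  have : gerWordB p = String.ofList (gerWordB p).toList := by simp
  rw [this, hb]
  unfold gerWordA
  simpa using gerWordA_aux p.toList ""

-- ===== VERDICT (by name: the statement is the Claim_ definition above) =====
theorem diccionario_geringoso_spec : Claim_equal_diccionario_geringoso := by
  intro palabras _
  unfold Spec_diccionario_geringoso diccionario_geringoso diccionario_geringoso_alt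
  simp [gerWord_eq]
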